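-- pv_equiv track=rewrite | github.com/Saakaarb/Deep-Learning-Risk-Quantification-for-Aviation-Incidents | Data_prep/risk_mapping.py | risk_mapping
-- ===== SOURCE A (Python) =====
-- def risk_mapping(output_data):
--     risk=[0]*len(output_data[0]) #Create output list
--
--     #Define the lists of risks as can be found in the reports. Punctuation may vary
--     high_risk=['General Declared Emergency', 'General Physical Injury / Incapacitation', 'Flight Crew Inflight Shutdown', 'Air Traffic Control Separated Traffic', 'Aircraft Damaged', 'Aircraft Aircraft Damaged' ]
--
--     moderately_high_risk=['General Evacuated', 'Flight Crew Regained Aircraft Control', 'Air Traffic Control Issued Advisory / Alert', 'Flight Crew Landed in Emergency Condition', 'Flight Crew Landed In Emergency Condition']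
--
--     medium_risk=['General Work Refused', 'Flight Crew Became Reoriented', 'Flight Crew Diverted', 'Flight Crew Executed Go Around / Missed Approach', 'Flight Crew Overcame Equipment Problem', 'Flight Crew Rejected Takeoff', 'Flight Crew Took Evasive Action', 'Air Traffic Control Issued New Clearance']
--
--     moderately_medium_risk=['General Maintenance Action', 'General Flight Cancelled / Delayed', 'General Release Refused / Aircraft Not Accepted', 'Flight Crew Overrode Automation', 'Flight Crew FLC Overrode Automation', 'Flight Crew Exited Penetrated Airspace', 'Flight Crew Requested ATC Assistance / Clarification', 'Flight Crew Landed As Precaution', 'Flight Crew Returned To Clearance', 'Flight Crew Returned To Departure Airport', 'Aircraft Automation Overrode Flight Crew']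
--
--     low_risk=['General Police / Security Involved', 'Flight Crew Returned To Gate', 'Aircraft Equipment Problem Dissipated', 'Air Traffic Control Provided Assistance', 'General None Reported / Taken', 'Flight Crew FLC complied w / Automation / Advisory']
--
--     #Map
--     k=0
--     for i in output_data[0]:
--         for j in i.split(';'): #One event can lead to multiple outcomes
--             j=j.strip()
--             if j in low_risk and risk[k]<=1:
--                 risk[k]=1
--             elif j in moderately_medium_risk and risk[k]<=2:
--                 risk[k]=2
--             elif j in medium_risk and risk[k]<=3:
--                 risk[k]=3
--             elif j in moderately_high_risk and risk[k]<=4: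
--                 risk[k]=4
--             elif j in high_risk and risk[k]<=5:
--                 risk[k]=5
--         k+=1
--     return risk
-- ===== SOURCE B (Python) =====
-- def risk_mapping(output_data):
--     # Severity ladder, most severe first; for each entry build its set of stripped
--     # outcome tokens once, then walk the ladder downward and stop at the first
--     # severity class the token set touches (0 if none).
--     ladder = [
--         (5, ['General Declared Emergency', 'General Physical Injury / Incapacitation', 'Flight Crew Inflight Shutdown', 'Air Traffic Control Separated Traffic', 'Aircraft Damaged', 'Aircraft Aircraft Damaged']),
--         (4, ['General Evacuated', 'Flight Crew Regained Aircraft Control', 'Air Traffic Control Issued Advisory / Alert', 'Flight Crew Landed in Emergency Condition', 'Flight Crew Landed In Emergency Condition']),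
--         (3, ['General Work Refused', 'Flight Crew Became Reoriented', 'Flight Crew Diverted', 'Flight Crew Executed Go Around / Missed Approach', 'Flight Crew Overcame Equipment Problem', 'Flight Crew Rejected Takeoff', 'Flight Crew Took Evasive Action', 'Air Traffic Control Issued New Clearance']),
--         (2, ['General Maintenance Action', 'General Flight Cancelled / Delayed', 'General Release Refused / Aircraft Not Accepted', 'Flight Crew Overrode Automation', 'Flight Crew FLC Overrode Automation', 'Flight Crew Exited Penetrated Airspace', 'Flight Crew Requested ATC Assistance / Clarification', 'Flight Crew Landed As Precaution', 'Flight Crew Returned To Clearance', 'Flight Crew Returned To Departure Airport', 'Aircraft Automation Overrode Flight Crew']),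
--         (1, ['General Police / Security Involved', 'Flight Crew Returned To Gate', 'Aircraft Equipment Problem Dissipated', 'Air Traffic Control Provided Assistance', 'General None Reported / Taken', 'Flight Crew FLC complied w / Automation / Advisory']),
--     ]
--     risk = []
--     for entry in output_data[0]:
--         tokens = {part.strip() for part in entry.split(';')}
--         level = 0
--         for lv, group in ladder:
--             if not tokens.isdisjoint(group):
--                 level = lv
--                 break
--         risk.append(level)
--     return risk
-- ===== Notes on version B (the rewrite author's own statement) =====
-- stated objective: alternative
-- what changed: A scans token by token, mutating risk[k] through a five-way ascending if/elif membership cascade with threshold guards; B instead builds each entry's set of stripped tokens once and walks a descending severity ladder, returning the first level whose class intersects the token set (early break), with no per-token state or max.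
import Mathlib
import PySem

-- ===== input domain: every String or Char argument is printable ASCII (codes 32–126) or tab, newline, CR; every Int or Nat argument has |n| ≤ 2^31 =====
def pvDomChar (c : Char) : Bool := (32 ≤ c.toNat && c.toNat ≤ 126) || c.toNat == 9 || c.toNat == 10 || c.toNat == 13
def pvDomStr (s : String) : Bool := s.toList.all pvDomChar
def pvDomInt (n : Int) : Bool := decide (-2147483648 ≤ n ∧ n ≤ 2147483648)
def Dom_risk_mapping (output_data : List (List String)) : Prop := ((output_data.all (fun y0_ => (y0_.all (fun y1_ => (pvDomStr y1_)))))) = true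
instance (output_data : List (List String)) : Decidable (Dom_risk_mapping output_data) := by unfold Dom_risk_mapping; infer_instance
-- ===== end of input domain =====

-- B replaces A's per-token ascending if/elif cascade on a mutable risk[k] slot by a per-entry
-- token set walked against a descending severity ladder with early break (alternative; same cost).

-- shared data: the five outcome lists (verbatim constants of both sources)
def pvHigh : List String := ["General Declared Emergency", "General Physical Injury / Incapacitation", "Flight Crew Inflight Shutdown", "Air Traffic Control Separated Traffic", "Aircraft Damaged", "Aircraft Aircraft Damaged"]
def pvModHigh : List String := ["General Evacuated", "Flight Crew Regained Aircraft Control", "Air Traffic Control Issued Advisory / Alert", "Flight Crew Landed in Emergency Condition", "Flight Crew Landed In Emergency Condition"]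
def pvMed : List String := ["General Work Refused", "Flight Crew Became Reoriented", "Flight Crew Diverted", "Flight Crew Executed Go Around / Missed Approach", "Flight Crew Overcame Equipment Problem", "Flight Crew Rejected Takeoff", "Flight Crew Took Evasive Action", "Air Traffic Control Issued New Clearance"]
def pvModMed : List String := ["General Maintenance Action", "General Flight Cancelled / Delayed", "General Release Refused / Aircraft Not Accepted", "Flight Crew Overrode Automation", "Flight Crew FLC Overrode Automation", "Flight Crew Exited Penetrated Airspace", "Flight Crew Requested ATC Assistance / Clarification", "Flight Crew Landed As Precaution", "Flight Crew Returned To Clearance", "Flight Crew Returned To Departure Airport", "Aircraft Automation Overrode Flight Crew"]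
def pvLow : List String := ["General Police / Security Involved", "Flight Crew Returned To Gate", "Aircraft Equipment Problem Dissipated", "Air Traffic Control Provided Assistance", "General None Reported / Taken", "Flight Crew FLC complied w / Automation / Advisory"]

-- ===== PORT A =====
-- the body of A's inner loop: j stripped, then the if/elif cascade updating risk[k]
def pvStepA (k : Nat) (risk : List Int) (j : String) : List Int :=
  let j := PySem.Str.strip j
  if pvLow.contains j ∧ PySem.List.pyGetD risk (k : Int) 0 ≤ 1 then PySem.List.pySetD risk (k : Int) 1
  else if pvModMed.contains j ∧ PySem.List.pyGetD risk (k : Int) 0 ≤ 2 then PySem.List.pySetD risk (k : Int) 2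
  else if pvMed.contains j ∧ PySem.List.pyGetD risk (k : Int) 0 ≤ 3 then PySem.List.pySetD risk (k : Int) 3
  else if pvModHigh.contains j ∧ PySem.List.pyGetD risk (k : Int) 0 ≤ 4 then PySem.List.pySetD risk (k : Int) 4
  else if pvHigh.contains j ∧ PySem.List.pyGetD risk (k : Int) 0 ≤ 5 then PySem.List.pySetD risk (k : Int) 5
  else risk

def risk_mapping (output_data : List (List String)) : List Int :=
  match output_data with
  | [] => []   -- output_data[0] raises IndexError: excluded by Pre_
  | row :: _ =>
    let risk : List Int := List.replicate row.length 0
    (row.foldl (fun (st : List Int × Nat) i =>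
        (((PySem.Str.split? i ";").getD []).foldl (pvStepA st.2) st.1, st.2 + 1))
      (risk, 0)).1

-- ===== PORT B =====
-- the severity ladder, most severe first
def pvLadder : List (Int × List String) := [(5, pvHigh), (4, pvModHigh), (3, pvMed), (2, pvModMed), (1, pvLow)]

-- B's inner for-loop with break: first level whose class touches the token set, else 0
def pvPick : List (Int × List String) → PySem.Set String → Int
  | [], _ => 0
  | (lv, g) :: rest, toks =>
    if PySem.Set.isdisjoint toks g = false then lv else pvPick rest toks

def risk_mapping_alt (output_data : List (List String)) : List Int :=
  match output_data with
  | [] => []   -- output_data[0] raises IndexError: excluded by Pre_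
  | row :: _ =>
    row.foldl (fun risk entry =>
      risk ++ [pvPick pvLadder
        (PySem.Set.ofList (((PySem.Str.split? entry ";").getD []).map PySem.Str.strip))]) []

-- ===== PRECONDITION & SPEC =====
-- Pre_ excludes only the empty outer list, on which A raises IndexError (output_data[0]).
def Pre_risk_mapping (output_data : List (List String)) : Prop := output_data ≠ []
instance (output_data : List (List String)) : Decidable (Pre_risk_mapping output_data) := by unfold Pre_risk_mapping; infer_instance

def pvWitness_risk_mapping : List (List String) := [["Aircraft Damaged; Flight Crew Diverted", "nonsense"]]

def Spec_risk_mapping (output_data : List (List String)) (out : List Int) : Prop := out = risk_mapping_alt output_data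
instance (output_data : List (List String)) (out : List Int) : Decidable (Spec_risk_mapping output_data out) := by unfold Spec_risk_mapping; infer_instance

-- ===== CLAIM (what is proved, stated in full; the proofs are below) =====
def Claim_equal_risk_mapping : Prop := ∀ (output_data : List (List String)), Dom_risk_mapping output_data → Pre_risk_mapping output_data → Spec_risk_mapping output_data (risk_mapping output_data)

-- ===== LEMMAS AND PROOFS =====

-- proof-side severity of a single token (descending first-match)
def pvLevel (s : String) : Int :=
  if pvHigh.contains s then 5
  else if pvModHigh.contains s then 4
  else if pvMed.contains s then 3
  else if pvModMed.contains s then 2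
  else if pvLow.contains s then 1
  else 0

-- the five lists are pairwise disjoint, so each membership pins pvLevel
set_option maxRecDepth 8192 in
theorem pvLevel_low (s : String) (h : s ∈ pvLow) :
    pvLevel s = 1 ∧ pvModMed.contains s = false ∧ pvMed.contains s = false ∧
    pvModHigh.contains s = false ∧ pvHigh.contains s = false := by
  fin_cases h <;> decide

set_option maxRecDepth 8192 in
theorem pvLevel_modmed (s : String) (h : s ∈ pvModMed) :
    pvLevel s = 2 ∧ pvLow.contains s = false ∧ pvMed.contains s = false ∧
    pvModHigh.contains s = false ∧ pvHigh.contains s = false := by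
  fin_cases h <;> decide

set_option maxRecDepth 8192 in
theorem pvLevel_med (s : String) (h : s ∈ pvMed) :
    pvLevel s = 3 ∧ pvLow.contains s = false ∧ pvModMed.contains s = false ∧
    pvModHigh.contains s = false ∧ pvHigh.contains s = false := by
  fin_cases h <;> decide

set_option maxRecDepth 8192 in
theorem pvLevel_modhigh (s : String) (h : s ∈ pvModHigh) :
    pvLevel s = 4 ∧ pvLow.contains s = false ∧ pvModMed.contains s = false ∧
    pvMed.contains s = false ∧ pvHigh.contains s = false := by
  fin_cases h <;> decide

set_option maxRecDepth 8192 in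
theorem pvLevel_high (s : String) (h : s ∈ pvHigh) :
    pvLevel s = 5 ∧ pvLow.contains s = false ∧ pvModMed.contains s = false ∧
    pvMed.contains s = false ∧ pvModHigh.contains s = false := by
  fin_cases h <;> decide

theorem pvLevel_none (s : String) (h1 : s ∉ pvLow) (h2 : s ∉ pvModMed) (h3 : s ∉ pvMed)
    (h4 : s ∉ pvModHigh) (h5 : s ∉ pvHigh) : pvLevel s = 0 := by
  unfold pvLevel
  simp only [List.contains_eq_mem, decide_eq_true_eq]
  split_ifs <;> tauto

theorem pv_set_getD_self (l : List Int) (k : Nat) (h : k < l.length) :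
    l.set k (l.getD k 0) = l := by
  rw [List.getD_eq_getElem l 0 h]; exact List.set_getElem_self h

theorem pv_getD_set_self (l : List Int) (k : Nat) (a : Int) (h : k < l.length) :
    (l.set k a).getD k 0 = a := by
  rw [List.getD_eq_getElem _ 0 (by simpa using h)]
  exact List.getElem_set_self (by simpa using h)

-- A's cascade step computes exactly max v (pvLevel of the stripped token)
theorem pvStepA_eq_set (k : Nat) (risk : List Int) (j : String) (hk : k < risk.length)
    (hv : 0 ≤ risk.getD k 0) :
    pvStepA k risk j = risk.set k (max (risk.getD k 0) (pvLevel (PySem.Str.strip j))) := by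
  unfold pvStepA
  simp only [PySem.List.pyGetD_natCast, PySem.List.pySetD_natCast]
  set s := PySem.Str.strip j with hs
  set v := risk.getD k 0 with hv'
  by_cases m1 : s ∈ pvLow
  · obtain ⟨ht, c2, c3, c4, c5⟩ := pvLevel_low s m1
    have m1' : pvLow.contains s = true := by simpa using m1
    rw [ht]
    simp only [m1', c2, c3, c4, c5, Bool.false_eq_true, false_and, if_false, true_and]
    split_ifs with hle
    · rw [show max v 1 = (1:Int) * 1 by omega, one_mul]
    · rw [show max v 1 = v by omega, hv', pv_set_getD_self risk k hk]
  by_cases m2 : s ∈ pvModMed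
  · obtain ⟨ht, c1, c3, c4, c5⟩ := pvLevel_modmed s m2
    have m2' : pvModMed.contains s = true := by simpa using m2
    rw [ht]
    simp only [m2', c1, c3, c4, c5, Bool.false_eq_true, false_and, if_false, true_and]
    split_ifs with hle
    · rw [show max v 2 = (1:Int) * 2 by omega, one_mul]
    · rw [show max v 2 = v by omega, hv', pv_set_getD_self risk k hk]
  by_cases m3 : s ∈ pvMed
  · obtain ⟨ht, c1, c2, c4, c5⟩ := pvLevel_med s m3
    have m3' : pvMed.contains s = true := by simpa using m3
    rw [ht]
    simp only [m3', c1, c2, c4, c5, Bool.false_eq_true, false_and, if_false, true_and]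
    split_ifs with hle
    · rw [show max v 3 = (1:Int) * 3 by omega, one_mul]
    · rw [show max v 3 = v by omega, hv', pv_set_getD_self risk k hk]
  by_cases m4 : s ∈ pvModHigh
  · obtain ⟨ht, c1, c2, c3, c5⟩ := pvLevel_modhigh s m4
    have m4' : pvModHigh.contains s = true := by simpa using m4
    rw [ht]
    simp only [m4', c1, c2, c3, c5, Bool.false_eq_true, false_and, if_false, true_and]
    split_ifs with hle
    · rw [show max v 4 = (1:Int) * 4 by omega, one_mul]
    · rw [show max v 4 = v by omega, hv', pv_set_getD_self risk k hk]
  by_cases m5 : s ∈ pvHigh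
  · obtain ⟨ht, c1, c2, c3, c4⟩ := pvLevel_high s m5
    have m5' : pvHigh.contains s = true := by simpa using m5
    rw [ht]
    simp only [m5', c1, c2, c3, c4, Bool.false_eq_true, false_and, if_false, true_and]
    split_ifs with hle
    · rw [show max v 5 = (1:Int) * 5 by omega, one_mul]
    · rw [show max v 5 = v by omega, hv', pv_set_getD_self risk k hk]
  · have c1 : pvLow.contains s = false := by simpa using m1
    have c2 : pvModMed.contains s = false := by simpa using m2
    have c3 : pvMed.contains s = false := by simpa using m3
    have c4 : pvModHigh.contains s = false := by simpa using m4
    have c5 : pvHigh.contains s = false := by simpa using m5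
    rw [pvLevel_none s m1 m2 m3 m4 m5]
    simp only [c1, c2, c3, c4, c5, Bool.false_eq_true, false_and, if_false]
    rw [show max v 0 = v by omega, hv', pv_set_getD_self risk k hk]

-- the running-max fold over token levels and its basic facts
def pvFold (ts : List String) (a : Int) : Int := ts.foldl (fun v t => max v (pvLevel t)) a

theorem pvFold_ge_init (ts : List String) : ∀ a : Int, a ≤ pvFold ts a := by
  induction ts with
  | nil => intro a; simp [pvFold]
  | cons t ts ih =>
    intro a
    exact le_trans (le_max_left a (pvLevel t)) (ih (max a (pvLevel t)))

theorem pvFold_ge_elem (ts : List String) : ∀ (a : Int) (t : String), t ∈ ts → pvLevel t ≤ pvFold ts a := by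
  induction ts with
  | nil => intro a t h; cases h
  | cons u ts ih =>
    intro a t h
    rcases List.mem_cons.mp h with h | h
    · subst h
      exact le_trans (le_max_right a (pvLevel t)) (pvFold_ge_init ts _)
    · exact ih _ t h

theorem pvFold_le (ts : List String) : ∀ (a b : Int), a ≤ b → (∀ t ∈ ts, pvLevel t ≤ b) → pvFold ts a ≤ b := by
  induction ts with
  | nil => intro a b hab _; simpa [pvFold] using hab
  | cons u ts ih =>
    intro a b hab hall
    exact ih _ b (max_le hab (hall u (List.mem_cons_self))) (fun t ht => hall t (List.mem_cons_of_mem u ht))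

theorem pv_isdisjoint_false (ts g : List String) :
    PySem.Set.isdisjoint (PySem.Set.ofList ts) g = false ↔ ∃ t ∈ ts, t ∈ g := by
  rw [Bool.eq_false_iff]
  constructor
  · intro h
    by_contra hc
    push_neg at hc
    exact h ((PySem.Set.isdisjoint_iff _ _).mpr (fun x hx => hc x ((PySem.Set.mem_ofList _ _).mp hx)))
  · rintro ⟨t, ht, htg⟩ h
    exact (PySem.Set.isdisjoint_iff _ _).mp h t ((PySem.Set.mem_ofList _ _).mpr ht) htg

-- B's ladder walk equals the running max of pvLevel over the tokens
theorem pvPick_eq_fold (ts : List String) :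
    pvPick pvLadder (PySem.Set.ofList ts) = pvFold ts 0 := by
  simp only [pvLadder, pvPick]
  by_cases h5 : ∃ t ∈ ts, t ∈ pvHigh
  · rw [if_pos ((pv_isdisjoint_false ts pvHigh).mpr h5)]
    obtain ⟨t, ht, htg⟩ := h5
    have h1 : (5:Int) ≤ pvFold ts 0 := (pvLevel_high t htg).1 ▸ pvFold_ge_elem ts 0 t ht
    have h2 : pvFold ts 0 ≤ 5 := pvFold_le ts 0 5 (by norm_num)
      (fun u _ => by unfold pvLevel; split_ifs <;> norm_num)
    omega
  rw [if_neg (by rw [pv_isdisjoint_false]; exact h5)]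
  push_neg at h5
  have le4 : ∀ u ∈ ts, pvLevel u ≤ 4 := by
    intro u hu
    have := h5 u hu
    unfold pvLevel
    simp only [List.contains_eq_mem, decide_eq_true_eq]
    split_ifs with h <;> first | exact absurd h this | norm_num
  by_cases h4 : ∃ t ∈ ts, t ∈ pvModHigh
  · rw [if_pos ((pv_isdisjoint_false ts pvModHigh).mpr h4)]
    obtain ⟨t, ht, htg⟩ := h4
    have h1 : (4:Int) ≤ pvFold ts 0 := (pvLevel_modhigh t htg).1 ▸ pvFold_ge_elem ts 0 t ht
    have h2 : pvFold ts 0 ≤ 4 := pvFold_le ts 0 4 (by norm_num) le4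
    omega
  rw [if_neg (by rw [pv_isdisjoint_false]; exact h4)]
  push_neg at h4
  have le3 : ∀ u ∈ ts, pvLevel u ≤ 3 := by
    intro u hu
    have g5 := h5 u hu; have g4 := h4 u hu
    unfold pvLevel
    simp only [List.contains_eq_mem, decide_eq_true_eq]
    split_ifs with h h' <;> first | exact absurd h g5 | exact absurd h' g4 | norm_num
  by_cases h3 : ∃ t ∈ ts, t ∈ pvMed
  · rw [if_pos ((pv_isdisjoint_false ts pvMed).mpr h3)]
    obtain ⟨t, ht, htg⟩ := h3
    have h1 : (3:Int) ≤ pvFold ts 0 := (pvLevel_med t htg).1 ▸ pvFold_ge_elem ts 0 t ht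
    have h2 : pvFold ts 0 ≤ 3 := pvFold_le ts 0 3 (by norm_num) le3
    omega
  rw [if_neg (by rw [pv_isdisjoint_false]; exact h3)]
  push_neg at h3
  have le2 : ∀ u ∈ ts, pvLevel u ≤ 2 := by
    intro u hu
    have g5 := h5 u hu; have g4 := h4 u hu; have g3 := h3 u hu
    unfold pvLevel
    simp only [List.contains_eq_mem, decide_eq_true_eq]
    split_ifs with h h' h'' <;>
      first | exact absurd h g5 | exact absurd h' g4 | exact absurd h'' g3 | norm_num
  by_cases h2 : ∃ t ∈ ts, t ∈ pvModMed
  · rw [if_pos ((pv_isdisjoint_false ts pvModMed).mpr h2)]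
    obtain ⟨t, ht, htg⟩ := h2
    have hA : (2:Int) ≤ pvFold ts 0 := (pvLevel_modmed t htg).1 ▸ pvFold_ge_elem ts 0 t ht
    have hB : pvFold ts 0 ≤ 2 := pvFold_le ts 0 2 (by norm_num) le2
    omega
  rw [if_neg (by rw [pv_isdisjoint_false]; exact h2)]
  push_neg at h2
  have le1 : ∀ u ∈ ts, pvLevel u ≤ 1 := by
    intro u hu
    have g5 := h5 u hu; have g4 := h4 u hu; have g3 := h3 u hu; have g2 := h2 u hu
    unfold pvLevel
    simp only [List.contains_eq_mem, decide_eq_true_eq]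
    split_ifs with h h' h'' h''' <;>
      first | exact absurd h g5 | exact absurd h' g4 | exact absurd h'' g3 | exact absurd h''' g2 | norm_num
  by_cases h1 : ∃ t ∈ ts, t ∈ pvLow
  · rw [if_pos ((pv_isdisjoint_false ts pvLow).mpr h1)]
    obtain ⟨t, ht, htg⟩ := h1
    have hA : (1:Int) ≤ pvFold ts 0 := (pvLevel_low t htg).1 ▸ pvFold_ge_elem ts 0 t ht
    have hB : pvFold ts 0 ≤ 1 := pvFold_le ts 0 1 (by norm_num) le1
    omega
  rw [if_neg (by rw [pv_isdisjoint_false]; exact h1)]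
  push_neg at h1
  have le0 : pvFold ts 0 ≤ 0 := pvFold_le ts 0 0 (le_refl 0) (fun u hu =>
    le_of_eq (pvLevel_none u (h1 u hu) (h2 u hu) (h3 u hu) (h4 u hu) (h5 u hu)))
  have ge0 := pvFold_ge_init ts 0
  omega

theorem pv_inner (k : Nat) (parts : List String) : ∀ (risk : List Int), k < risk.length →
    0 ≤ risk.getD k 0 →
    parts.foldl (pvStepA k) risk =
      risk.set k (parts.foldl (fun v p => max v (pvLevel (PySem.Str.strip p))) (risk.getD k 0)) := by
  induction parts with
  | nil => intro risk hk hv; simp only [List.foldl_nil]; rw [pv_set_getD_self risk k hk]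
  | cons p ps ih =>
    intro risk hk hv
    simp only [List.foldl_cons]
    rw [pvStepA_eq_set k risk p hk hv]
    rw [ih _ (by simpa using hk)
        (by rw [pv_getD_set_self _ _ _ hk]; exact le_trans hv (le_max_left _ _))]
    rw [pv_getD_set_self _ _ _ hk, List.set_set]

theorem pv_outer (rem : List String) : ∀ (done : List Int),
    (rem.foldl (fun (st : List Int × Nat) i =>
        (((PySem.Str.split? i ";").getD []).foldl (pvStepA st.2) st.1, st.2 + 1))
      (done ++ List.replicate rem.length 0, done.length)).1 =
    done ++ rem.map (fun entry => pvPick pvLadder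
        (PySem.Set.ofList (((PySem.Str.split? entry ";").getD []).map PySem.Str.strip))) := by
  induction rem with
  | nil => intro done; simp
  | cons i is ih =>
    intro done
    have hk : done.length < (done ++ (0:Int) :: List.replicate is.length 0).length := by simp
    have hg : (done ++ (0:Int) :: List.replicate is.length 0).getD done.length 0 = 0 := by simp
    simp only [List.length_cons, List.replicate_succ, List.foldl_cons, List.map_cons]
    rw [pv_inner done.length _ _ hk (le_of_eq hg.symm), hg]
    have hw : ((PySem.Str.split? i ";").getD []).foldl
        (fun v p => max v (pvLevel (PySem.Str.strip p))) 0 =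
        pvPick pvLadder (PySem.Set.ofList (((PySem.Str.split? i ";").getD []).map PySem.Str.strip)) := by
      rw [pvPick_eq_fold]
      simp [pvFold, List.foldl_map]
    rw [hw]
    generalize pvPick pvLadder (PySem.Set.ofList (((PySem.Str.split? i ";").getD []).map PySem.Str.strip)) = w
    rw [show (done ++ (0:Int) :: List.replicate is.length 0).set done.length w
          = (done ++ [w]) ++ List.replicate is.length 0 from by simp,
        show done.length + 1 = (done ++ [w]).length from by simp,
        ih (done ++ [w])]
    simp

-- ===== VERDICT (by name: the statement is the Claim_ definition above) =====
theorem risk_mapping_spec : Claim_equal_risk_mapping := by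
  intro output_data _ hpre
  unfold Spec_risk_mapping risk_mapping risk_mapping_alt
  cases output_data with
  | nil => exact absurd rfl hpre
  | cons row rest =>
    simp only
    rw [show (List.replicate row.length (0:Int)) = [] ++ List.replicate row.length 0 from rfl,
        show 0 = ([] : List Int).length from rfl, pv_outer,
        PySem.List.foldl_append_singleton_eq_map]
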